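-- pv_equiv track=rewrite | github.com/qcircuit-submission/codes | supplementary_material_for_rebuttal/supplementary_circuits/minimal_width_ASCON_codes/minimal_width_SAT.py | get_terms_str
-- ===== SOURCE A (Python) =====
-- def get_terms_str(n):
--     from itertools import combinations
--     inputs = [i for i in range(n)]
--     x_terms = ["1"]
--     for ki in range(1, n + 1):
--         # C(n, k), 1*2, 1*3, 2*3...
--         numbers = list(combinations(inputs, ki))
--         for num_tuple in numbers:
--             xi_list = ["x" + str(i) for i in num_tuple]
--             xi_str = "*".join(xi_list)
--             x_terms.append(xi_str)
--     return x_terms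
-- ===== SOURCE B (Python) =====
-- def get_terms_str(n):
--     # Level-by-level dynamic construction: subsets of size k+1 are obtained by
--     # extending each size-k subset (kept as its last index and its term string)
--     # with every larger index, which preserves combinations' lexicographic order.
--     terms = ["1"]
--     level = [(i, "x" + str(i)) for i in range(n)]
--     while level:
--         terms.extend(s for _, s in level)
--         level = [(j, s + "*x" + str(j))
--                  for last, s in level
--                  for j in range(last + 1, n)]
--     return terms
-- ===== Notes on version B (the rewrite author's own statement) =====
-- stated objective: alternative
-- what changed: Replaces itertools.combinations with an iterative level-by-level construction: each size-(k+1) subset term is built by extending a size-k entry (kept as its last index and term string) with every larger index, which preserves combinations' lexicographic order.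
import Mathlib
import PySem

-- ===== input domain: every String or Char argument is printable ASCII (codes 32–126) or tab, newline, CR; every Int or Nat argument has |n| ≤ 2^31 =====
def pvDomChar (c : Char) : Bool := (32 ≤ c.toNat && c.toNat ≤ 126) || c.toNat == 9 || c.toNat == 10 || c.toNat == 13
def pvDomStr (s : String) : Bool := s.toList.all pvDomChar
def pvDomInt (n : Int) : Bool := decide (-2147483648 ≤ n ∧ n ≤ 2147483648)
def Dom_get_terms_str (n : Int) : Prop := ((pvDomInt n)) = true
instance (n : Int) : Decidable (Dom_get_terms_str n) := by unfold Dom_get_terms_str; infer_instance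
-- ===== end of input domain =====

-- B replaces itertools.combinations with a level-by-level construction: the size-(k+1)
-- subsets are obtained by extending each size-k subset (kept as its last index and its
-- term string) with every larger index; return values are identical.

-- ===== PORT A =====
-- itertools.combinations(xs, k) in lexicographic order (choose head / skip head)
def pvCombos : List Int → Nat → List (List Int)
  | _, 0 => [[]]
  | [], _ + 1 => []
  | x :: xs, k + 1 => (pvCombos xs k).map (x :: ·) ++ pvCombos xs (k + 1)

def get_terms_str (n : Int) : List String :=
  let inputs := PySem.List.pyRange 0 n 1
  let x_terms := ["1"]
  (PySem.List.pyRange 1 (n + 1) 1).foldl (fun acc ki =>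
    let numbers := pvCombos inputs ki.toNat
    numbers.foldl (fun acc2 num_tuple =>
      let xi_list := num_tuple.map (fun i => "x" ++ PySem.Int.toStr i)
      let xi_str := PySem.Str.join "*" xi_list
      acc2 ++ [xi_str]) acc) x_terms

-- ===== PORT B =====
-- the nested comprehension computing the next level from the current one
def pvNext (n : Int) (level : List (Int × String)) : List (Int × String) :=
  level.flatMap (fun p =>
    (PySem.List.pyRange (p.1 + 1) n 1).map (fun j => (j, p.2 ++ "*x" ++ PySem.Int.toStr j)))

-- 'while level:' — fuel is only a totality guard; n.toNat + 1 iterations always suffice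
def pvLevels (n : Int) : Nat → List (Int × String) → List String
  | 0, _ => []
  | fuel + 1, level =>
      if level = [] then []
      else level.map Prod.snd ++ pvLevels n fuel (pvNext n level)

def get_terms_str_alt (n : Int) : List String :=
  "1" :: pvLevels n (n.toNat + 1)
    ((PySem.List.pyRange 0 n 1).map (fun i => (i, "x" ++ PySem.Int.toStr i)))

-- ===== PRECONDITION & SPEC =====
def Spec_get_terms_str (n : Int) (out : List String) : Prop := out = get_terms_str_alt n
instance (n : Int) (out : List String) : Decidable (Spec_get_terms_str n out) := by unfold Spec_get_terms_str; infer_instance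

-- ===== CLAIM (what is proved, stated in full; the proofs are below) =====
def Claim_equal_get_terms_str : Prop := ∀ (n : Int), Dom_get_terms_str n → Spec_get_terms_str n (get_terms_str n)

-- ===== LEMMAS AND PROOFS =====

def pvF (i : Int) : String := "x" ++ PySem.Int.toStr i

def pvG (c : List Int) : String := PySem.Str.join "*" (c.map pvF)

def pvPair (c : List Int) : Int × String := (c.getLastD (-1), pvG c)

def pvExt (n a : Int) (c : List Int) : List (List Int) :=
  (PySem.List.pyRange (c.getLastD (a - 1) + 1) n 1).map (fun j => c ++ [j])

theorem pvStrJoin_singleton (sep s : String) : PySem.Str.join sep [s] = s := by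
  apply String.toList_inj.mp
  simp [PySem.Str.toList_join, PySem.Chars.join_singleton]

theorem pvCharsJoin_concat (sep x : List Char) :
    ∀ (l : List (List Char)), l ≠ [] →
      PySem.Chars.join sep (l ++ [x]) = PySem.Chars.join sep l ++ sep ++ x := by
  intro l
  induction l with
  | nil => intro h; exact absurd rfl h
  | cons a t ih =>
      intro _
      cases t with
      | nil => simp [PySem.Chars.join_cons_cons, PySem.Chars.join_singleton]
      | cons b r =>
          have := ih (by simp)
          simp only [List.cons_append, PySem.Chars.join_cons_cons] at this ⊢
          rw [this]
          simp [List.append_assoc]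

theorem pvStrJoin_concat (sep x : String) (l : List String) (h : l ≠ []) :
    PySem.Str.join sep (l ++ [x]) = PySem.Str.join sep l ++ sep ++ x := by
  apply String.toList_inj.mp
  simp only [PySem.Str.toList_join, String.toList_append, List.map_append, List.map_cons,
    List.map_nil]
  exact pvCharsJoin_concat sep.toList x.toList (l.map String.toList) (by simpa using h)

theorem pvCombos_eq_nil : ∀ (xs : List Int) (k : Nat), xs.length < k → pvCombos xs k = [] := by
  intro xs
  induction xs with
  | nil =>
      intro k h
      cases k with
      | zero => omega
      | succ k => rfl
  | cons x t ih =>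
      intro k h
      cases k with
      | zero => omega
      | succ k =>
          simp only [pvCombos]
          rw [ih k (by simp at h; omega), ih (k + 1) (by simp at h; omega)]
          simp

theorem pvCombos_ne_nil (k : Nat) : ∀ (xs : List Int), k ≤ xs.length → pvCombos xs k ≠ [] := by
  induction k with
  | zero => intro xs _; simp [pvCombos]
  | succ k ih =>
      intro xs h
      cases xs with
      | nil => simp at h
      | cons x t =>
          simp only [pvCombos]
          have := ih t (by simp at h; omega)
          intro hc
          rcases List.append_eq_nil_iff.mp hc with ⟨h1, _⟩
          exact this (List.map_eq_nil_iff.mp h1)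

theorem pvCombos_mem_ne_nil (k : Nat) :
    ∀ (xs : List Int) (c : List Int), c ∈ pvCombos xs (k + 1) → c ≠ [] := by
  induction k with
  | zero =>
      intro xs
      induction xs with
      | nil => intro c hc; simp [pvCombos] at hc
      | cons x t iht =>
          intro c hc
          simp only [pvCombos, List.mem_append] at hc
          rcases hc with hc | hc
          · simp at hc; simp [hc]
          · exact iht c hc
  | succ k ih =>
      intro xs
      induction xs with
      | nil => intro c hc; simp [pvCombos] at hc
      | cons x t iht =>
          intro c hc
          simp only [pvCombos, List.mem_append, List.mem_map] at hc
          rcases hc with ⟨d, _, rfl⟩ | hc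
          · simp
          · exact iht c hc

theorem pvGetLastD_ne_nil {c : List Int} (h : c ≠ []) (d1 d2 : Int) :
    c.getLastD d1 = c.getLastD d2 := by
  cases c with
  | nil => exact absurd rfl h
  | cons x t => rw [List.getLastD_cons, List.getLastD_cons]

-- the level-step identity: size-(k+1) combinations, in itertools' lexicographic order,
-- are exactly the size-k combinations each extended by every larger element of the range
theorem pvStep (n : Int) :
    ∀ (m : Nat) (a : Int) (k : Nat), (n - a).toNat = m →
      pvCombos (PySem.List.pyRange a n 1) (k + 1)
        = (pvCombos (PySem.List.pyRange a n 1) k).flatMap (pvExt n a) := by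
  intro m
  induction m with
  | zero =>
      intro a k h
      have hna : n ≤ a := by omega
      rw [PySem.List.pyRange_one_eq_nil hna]
      cases k with
      | zero =>
          simp [pvCombos, pvExt, List.getLastD, PySem.List.pyRange_one_eq_nil hna]
      | succ k => simp [pvCombos]
  | succ m ih =>
      intro a k h
      by_cases hlt : a < n
      · have hR : (n - (a + 1)).toNat = m := by omega
        rw [PySem.List.pyRange_one_cons hlt]
        cases k with
        | zero =>
            have h1 : pvCombos (PySem.List.pyRange (a+1) n 1) 1
                = (PySem.List.pyRange (a+1) n 1).map (fun j => [j]) := by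
              rw [ih (a+1) 0 hR]
              simp [pvCombos, pvExt, List.getLastD]
            simp only [pvCombos, h1, List.map_cons, List.map_nil, List.flatMap_cons, List.flatMap_nil, List.append_nil]
            simp [pvExt, List.getLastD, PySem.List.pyRange_one_cons hlt]
        | succ k =>
            simp only [pvCombos, List.flatMap_append]
            congr 1
            · -- map (a::) (combos R (k+1)) = flatMap of the mapped level
              rw [ih (a+1) k hR]
              rw [List.flatMap_map, List.map_flatMap]
              apply List.flatMap_congr
              intro c _
              show (pvExt n (a+1) c).map (a :: ·) = pvExt n a (a :: c)
              symm
              simp only [pvExt, List.getLastD_cons, List.map_map]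
              have : a + 1 - 1 = a := by omega
              rw [this]
              apply List.map_congr_left
              intro j _
              simp
            · rw [ih (a+1) (k+1) hR]
              apply List.flatMap_congr
              intro c hc
              have hne := pvCombos_mem_ne_nil k _ c hc
              simp only [pvExt]
              rw [pvGetLastD_ne_nil hne (a - 1) (a + 1 - 1)]
      · have hna : n ≤ a := by omega
        rw [PySem.List.pyRange_one_eq_nil hna]
        cases k with
        | zero =>
            simp [pvCombos, pvExt, List.getLastD, PySem.List.pyRange_one_eq_nil hna]
        | succ k => simp [pvCombos]

theorem pvPair_concat (c : List Int) (hc : c ≠ []) (j : Int) :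
    pvPair (c ++ [j]) = (j, pvG c ++ "*x" ++ PySem.Int.toStr j) := by
  simp only [pvPair, List.getLastD_concat]
  congr 1
  simp only [pvG, List.map_append, List.map_cons, List.map_nil]
  rw [pvStrJoin_concat "*" (pvF j) (c.map pvF) (by simpa using hc)]
  apply String.toList_inj.mp
  simp [pvF]

theorem pvNext_level (n : Int) (k : Nat) :
    pvNext n ((pvCombos (PySem.List.pyRange 0 n 1) (k + 1)).map pvPair)
      = (pvCombos (PySem.List.pyRange 0 n 1) (k + 2)).map pvPair := by
  rw [pvStep n (n - 0).toNat 0 (k + 1) rfl]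
  rw [List.map_flatMap, pvNext, List.flatMap_map]
  apply List.flatMap_congr
  intro c hc
  have hne := pvCombos_mem_ne_nil k _ c hc
  simp only [pvExt, List.map_map, pvPair]
  rw [pvGetLastD_ne_nil hne (0 - 1) (-1)]
  apply List.map_congr_left
  intro j _
  show (j, pvG c ++ "*x" ++ PySem.Int.toStr j) = pvPair (c ++ [j])
  exact (pvPair_concat c hne j).symm

theorem pvCombos_one (xs : List Int) : pvCombos xs 1 = xs.map (fun j => [j]) := by
  induction xs with
  | nil => rfl
  | cons x t ih => simp [pvCombos, ih]

theorem pvLoop (n : Int) :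
    ∀ (fuel : Nat) (k : Nat), 1 ≤ k → n.toNat + 1 - k ≤ fuel →
      pvLevels n fuel ((pvCombos (PySem.List.pyRange 0 n 1) k).map pvPair)
        = (PySem.List.pyRange (k : Int) (n + 1) 1).flatMap
            (fun ki => (pvCombos (PySem.List.pyRange 0 n 1) ki.toNat).map pvG) := by
  intro fuel
  induction fuel with
  | zero =>
      intro k hk hf
      have hgt : n.toNat < k := by omega
      have hnil : pvCombos (PySem.List.pyRange 0 n 1) k = [] := by
        apply pvCombos_eq_nil
        rw [PySem.List.length_pyRange_one]; omega
      rw [hnil, PySem.List.pyRange_one_eq_nil (by omega : n + 1 ≤ (k : Int))]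
      simp [pvLevels]
  | succ fuel ih =>
      intro k hk hf
      by_cases hbig : n.toNat < k
      · have hnil : pvCombos (PySem.List.pyRange 0 n 1) k = [] := by
          apply pvCombos_eq_nil
          rw [PySem.List.length_pyRange_one]; omega
        rw [hnil, PySem.List.pyRange_one_eq_nil (by omega : n + 1 ≤ (k : Int))]
        simp [pvLevels]
      · have hkn : k ≤ n.toNat := by omega
        have hnn : 0 ≤ n := by omega
        have hne : pvCombos (PySem.List.pyRange 0 n 1) k ≠ [] := by
          apply pvCombos_ne_nil
          rw [PySem.List.length_pyRange_one]; omega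
        obtain ⟨k', rfl⟩ : ∃ k', k = k' + 1 := ⟨k - 1, by omega⟩
        rw [pvLevels]
        rw [if_neg (by simpa using hne)]
        rw [pvNext_level n k']
        have hcast : ((k' + 2 : Nat) : Int) = ((k' + 1 : Nat) : Int) + 1 := by push_cast; ring
        have hklt : ((k' + 1 : Nat) : Int) < n + 1 := by
          have : ((k' + 1 : Nat) : Int) ≤ n.toNat := by exact_mod_cast hkn
          omega
        rw [ih (k' + 2) (by omega) (by omega)]
        rw [PySem.List.pyRange_one_cons hklt, List.flatMap_cons]
        congr 1
        · rw [Int.toNat_natCast, List.map_map]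
          apply List.map_congr_left
          intro c _
          rfl

-- ===== VERDICT (by name: the statement is the Claim_ definition above) =====
theorem get_terms_str_spec : Claim_equal_get_terms_str := by
  intro n _
  unfold Spec_get_terms_str get_terms_str get_terms_str_alt
  simp only [PySem.List.foldl_append_singleton_eq_map, PySem.List.foldl_append_eq_flatMap]
  have hinit : (PySem.List.pyRange 0 n 1).map (fun i => (i, "x" ++ PySem.Int.toStr i))
      = (pvCombos (PySem.List.pyRange 0 n 1) 1).map pvPair := by
    rw [pvCombos_one, List.map_map]
    apply List.map_congr_left
    intro i _
    show (i, "x" ++ PySem.Int.toStr i) = pvPair [i]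
    simp [pvPair, pvG, pvF, List.getLastD, pvStrJoin_singleton]
  rw [hinit, pvLoop n (n.toNat + 1) 1 (by omega) (by omega)]
  simp only [List.cons_append, List.nil_append, Nat.cast_one]
  congr 1
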